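-- pv_equiv track=rewrite | github.com/phil-jonesQ/py_memory | py_memory.py | translate_cell_to_row_cols
-- ===== SOURCE A (Python) =====
-- ROWS = 6
--
-- def translate_cell_to_row_cols(cell):
--     counter = 0
--     for ROW in range(ROWS):
--         for COL in range(ROWS):
--             if counter == cell:
--                 return tuple((COL, ROW))
--             counter += 1
--     return tuple((COL, ROW))
-- ===== SOURCE B (Python) =====
-- def translate_cell_to_row_cols(cell):
--     # closed form: valid cells map directly via divmod; anything else falls
--     # through to (5, 5), the leftover loop state of the original scan
--     if isinstance(cell, int) and 0 <= cell < 36: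
--         return (cell % 6, cell // 6)
--     return (5, 5)
-- ===== Notes on version B (the rewrite author's own statement) =====
-- stated objective: simpler
-- what changed: Replaces the 36-step nested counter scan with a closed-form divmod: (cell % 6, cell // 6) for 0 <= cell < 36, else (5, 5).
import Mathlib
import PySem

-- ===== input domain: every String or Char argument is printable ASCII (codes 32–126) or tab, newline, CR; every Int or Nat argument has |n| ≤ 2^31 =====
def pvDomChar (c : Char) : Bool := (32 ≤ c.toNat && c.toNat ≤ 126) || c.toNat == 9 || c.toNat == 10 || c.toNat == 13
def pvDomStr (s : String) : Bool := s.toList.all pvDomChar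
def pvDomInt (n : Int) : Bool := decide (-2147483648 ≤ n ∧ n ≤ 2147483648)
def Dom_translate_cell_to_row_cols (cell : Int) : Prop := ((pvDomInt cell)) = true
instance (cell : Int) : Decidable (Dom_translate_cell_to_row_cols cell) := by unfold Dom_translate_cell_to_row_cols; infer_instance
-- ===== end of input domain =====

-- B replaces A's 36-step nested counter scan by a closed-form divmod (simpler, constant work).

-- ===== PORT A =====
-- inner 'for COL in range(ROWS)': either early-returns (COL, ROW) or yields the advanced counter
def pvACols (cols : List Int) (row cell counter : Int) : (Int × Int) ⊕ Int :=
  match cols with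
  | [] => .inr counter
  | c :: rest => if counter == cell then .inl (c, row) else pvACols rest row cell (counter + 1)

-- outer 'for ROW in range(ROWS)': none = fell through both loops
def pvARows (rows : List Int) (cell counter : Int) : Option (Int × Int) :=
  match rows with
  | [] => none
  | r :: rest =>
    match pvACols (PySem.List.pyRange 0 6 1) r cell counter with
    | .inl p => some p
    | .inr c => pvARows rest cell c

def translate_cell_to_row_cols (cell : Int) : Int × Int :=
  match pvARows (PySem.List.pyRange 0 6 1) cell 0 with
  | some p => p
  | none => (5, 5)  -- final 'return tuple((COL, ROW))' with leftover loop variables COL = ROW = 5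

-- ===== PORT B =====
def translate_cell_to_row_cols_alt (cell : Int) : Int × Int :=
  if 0 ≤ cell ∧ cell < 36 then (PySem.Int.mod cell 6, PySem.Int.floordiv cell 6) else (5, 5)

-- ===== PRECONDITION & SPEC =====
def Spec_translate_cell_to_row_cols (cell : Int) (out : Int × Int) : Prop := out = translate_cell_to_row_cols_alt cell
instance (cell : Int) (out : Int × Int) : Decidable (Spec_translate_cell_to_row_cols cell out) := by unfold Spec_translate_cell_to_row_cols; infer_instance

-- ===== CLAIM (what is proved, stated in full; the proofs are below) =====
def Claim_equal_translate_cell_to_row_cols : Prop := ∀ (cell : Int), Dom_translate_cell_to_row_cols cell → Spec_translate_cell_to_row_cols cell (translate_cell_to_row_cols cell)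

-- ===== LEMMAS AND PROOFS =====

-- if cell never matches a counter value, the inner loop just advances the counter
lemma pvACols_inr (cols : List Int) (row cell counter : Int)
    (h : cell < counter ∨ counter + cols.length ≤ cell) :
    pvACols cols row cell counter = .inr (counter + cols.length) := by
  induction cols generalizing counter with
  | nil => simp [pvACols]
  | cons c rest ih =>
    simp only [pvACols, List.length_cons]
    rw [if_neg (by simp only [beq_iff_eq]; simp at h ⊢; omega), ih _ (by simp at h ⊢; omega)]
    congr 1
    push_cast
    ring

-- out-of-range cell falls through all rows
lemma pvARows_none (rows : List Int) (cell counter : Int)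
    (h : cell < counter ∨ counter + 6 * rows.length ≤ cell) :
    pvARows rows cell counter = none := by
  induction rows generalizing counter with
  | nil => simp [pvARows]
  | cons r rest ih =>
    simp only [pvARows]
    rw [pvACols_inr _ _ _ _ (by simp [PySem.List.pyRange] at h ⊢; omega)]
    exact ih _ (by simp [PySem.List.pyRange] at h ⊢; omega)

-- out-of-range cell: every counter comparison fails, A falls through to (5, 5)
lemma pvA_out (cell : Int) (h : cell < 0 ∨ 36 ≤ cell) :
    translate_cell_to_row_cols cell = (5, 5) := by
  unfold translate_cell_to_row_cols
  rw [pvARows_none _ _ _ (by simp [PySem.List.pyRange]; omega)]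

-- ===== VERDICT (by name: the statement is the Claim_ definition above) =====
theorem translate_cell_to_row_cols_spec : Claim_equal_translate_cell_to_row_cols := by
  intro cell _
  unfold Spec_translate_cell_to_row_cols
  by_cases h : 0 ≤ cell ∧ cell < 36
  · obtain ⟨h1, h2⟩ := h
    interval_cases cell <;> decide
  · rw [pvA_out cell (by omega)]
    simp only [translate_cell_to_row_cols_alt, if_neg h]
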